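-- pv_equiv track=rewrite | github.com/karpovvvm/busidoavto | python_code/chanelBot/main.py | litering_by_three
-- ===== SOURCE A (Python) =====
-- def litering_by_three(a):
--     try:
--         a = str(a)
--         a = a[::-1]
--         result = ' '.join([a[i:i + 3] for i in range(0, len(a), 3)])
--     except Exception as e:
--         pass
--     finally:
--         return result[::-1]
-- ===== SOURCE B (Python) =====
-- def litering_by_three(a):
--     try:
--         a = str(a)
--         chars = []
--         for idx, c in enumerate(a[::-1]):
--             if idx > 0 and idx % 3 == 0:
--                 chars.append(' ')
--             chars.append(c)
--         result = ''.join(chars)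
--     except Exception as e:
--         pass
--     finally:
--         return result[::-1]
-- ===== Notes on version B (the rewrite author's own statement) =====
-- stated objective: alternative
-- what changed: Replaces the slice-into-3-char-windows comprehension joined by ' '.join with a single character-by-character pass over the reversed digits that inserts a space whenever the running index is a positive multiple of 3.
import Mathlib
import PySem

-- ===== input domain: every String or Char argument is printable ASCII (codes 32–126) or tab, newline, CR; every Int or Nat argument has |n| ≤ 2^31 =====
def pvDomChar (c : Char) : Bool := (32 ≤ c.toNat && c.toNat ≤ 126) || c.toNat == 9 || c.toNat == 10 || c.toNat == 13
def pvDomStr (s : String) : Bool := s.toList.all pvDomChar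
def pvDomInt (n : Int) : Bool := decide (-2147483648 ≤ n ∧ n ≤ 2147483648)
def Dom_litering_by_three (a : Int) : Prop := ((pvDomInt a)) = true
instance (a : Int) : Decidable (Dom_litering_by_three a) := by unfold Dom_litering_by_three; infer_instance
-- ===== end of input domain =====

-- B replaces the chunk-slicing comprehension by one indexed pass inserting a space at every
-- positive multiple of 3; same O(n) cost, objective: alternative decomposition.

-- ===== PORT A =====
def litering_by_three (a : Int) : String :=
  let s := (PySem.Int.toChars a).reverse        -- a = str(a); a = a[::-1]
  let result := PySem.Chars.join [' ']
    ((PySem.List.pyRange 0 (s.length : Int) 3).map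
      (fun i => PySem.List.slice s (some i) (some (i + 3))))
  String.ofList result.reverse                  -- return result[::-1]

-- ===== PORT B =====
def litering_by_three_alt (a : Int) : String :=
  let s := (PySem.Int.toChars a).reverse        -- a = str(a); iterate over a[::-1]
  let chars := (PySem.List.enumerate s).foldl
    (fun acc p => (if 0 < p.1 && p.1 % 3 == 0 then acc ++ [' '] else acc) ++ [p.2]) []
  String.ofList chars.reverse                   -- result = ''.join(chars); return result[::-1]

-- ===== PRECONDITION & SPEC =====
def Spec_litering_by_three (a : Int) (out : String) : Prop := out = litering_by_three_alt a
instance (a : Int) (out : String) : Decidable (Spec_litering_by_three a out) := by unfold Spec_litering_by_three; infer_instance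

-- ===== CLAIM (what is proved, stated in full; the proofs are below) =====
def Claim_equal_litering_by_three : Prop := ∀ (a : Int), Dom_litering_by_three a → Spec_litering_by_three a (litering_by_three a)

-- ===== LEMMAS AND PROOFS =====

-- the common grouped form: chunks of three separated by a single space
def grp : List Char → List Char
  | [] => []
  | [c] => [c]
  | [c1, c2] => [c1, c2]
  | [c1, c2, c3] => [c1, c2, c3]
  | c1 :: c2 :: c3 :: c4 :: t => c1 :: c2 :: c3 :: ' ' :: grp (c4 :: t)

-- B's pass as a structural recursion carrying the index
def fsp : Int → List Char → List Char
  | _, [] => []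
  | i, c :: t => (if 0 < i && i % 3 == 0 then [' '] else []) ++ c :: fsp (i + 1) t

theorem grp_short (l : List Char) (h : l.length ≤ 3) : grp l = l := by
  match l with
  | [] => rfl
  | [_] => rfl
  | [_, _] => rfl
  | [_, _, _] => rfl
  | _ :: _ :: _ :: _ :: _ => simp at h; omega

theorem grp_long (l : List Char) (h : 3 < l.length) :
    grp l = l.take 3 ++ ' ' :: grp (l.drop 3) := by
  match l with
  | [] => simp at h
  | [_] => simp at h
  | [_, _] => simp at h
  | [_, _, _] => simp at h
  | _ :: _ :: _ :: _ :: _ => simp [grp]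

-- A's chunk list, joined, is grp
theorem join_chunks (m : Nat) : ∀ (l : List Char), l.length ≤ 3 * m → 3 * m < l.length + 3 →
    PySem.Chars.join [' '] ((List.range m).map (fun k => (l.drop (3 * k)).take 3)) = grp l := by
  induction m with
  | zero =>
    intro l h1 _
    have : l = [] := List.eq_nil_of_length_eq_zero (by omega)
    subst this; simp [PySem.Chars.join_nil, grp]
  | succ m ih =>
    intro l h1 h2
    rw [List.range_succ_eq_map, List.map_cons, List.map_map]
    have hmap : (List.range m).map ((fun k => (l.drop (3 * k)).take 3) ∘ Nat.succ)
        = (List.range m).map (fun k => ((l.drop 3).drop (3 * k)).take 3) := by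
      apply List.map_congr_left
      intro k _
      simp [Function.comp, List.drop_drop]
      ring_nf
    rw [hmap]
    match m with
    | 0 =>
      simp only [List.range_zero, List.map_nil]
      rw [PySem.Chars.join_singleton, grp_short l (by omega), Nat.mul_zero, List.drop_zero,
        List.take_of_length_le (by omega)]
    | Nat.succ m' =>
      have hlen : 3 < l.length := by omega
      have htail := ih (l.drop 3) (by simp; omega) (by simp; omega)
      have hne : (List.range (m' + 1)).map (fun k => ((l.drop 3).drop (3 * k)).take 3) ≠ [] := by
        simp
      obtain ⟨p, rest, hpr⟩ := List.exists_cons_of_ne_nil hne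
      rw [hpr]
      rw [PySem.Chars.join_cons_cons]
      rw [← hpr, htail, grp_long l hlen]
      simp

-- B's fold is fsp
theorem foldl_enum (l : List Char) : ∀ (i : Int) (acc : List Char),
    (PySem.List.enumerate l i).foldl
      (fun acc p => (if 0 < p.1 && p.1 % 3 == 0 then acc ++ [' '] else acc) ++ [p.2]) acc
      = acc ++ fsp i l := by
  induction l with
  | nil => intro i acc; simp [PySem.List.enumerate_nil, fsp]
  | cons c t ih =>
    intro i acc
    rw [PySem.List.enumerate_cons, List.foldl_cons, ih]
    by_cases h : (0 < i && i % 3 == 0) = true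
    · simp [fsp, h]
    · simp [fsp, h]

-- one-step unfolding equations for fsp
theorem fsp_nil (i : Int) : fsp i [] = [] := rfl
theorem fsp_cons (i : Int) (c : Char) (t : List Char) :
    fsp i (c :: t) = (if 0 < i && i % 3 == 0 then [' '] else []) ++ c :: fsp (i + 1) t := rfl

-- fsp at an index that is a nonnegative multiple of 3 is grp (with a leading space if positive)
theorem fsp_eq (l : List Char) : ∀ (i : Int), 0 ≤ i → 3 ∣ i →
    fsp i l = (if 0 < i ∧ l ≠ [] then [' '] else []) ++ grp l := by
  induction l using grp.induct with
  | case1 => intro i _ _; simp [fsp_nil, grp]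
  | case2 c =>
    intro i h0 h3
    have e1 : ¬ (0 < i + 1 && (i + 1) % 3 == 0) = true := by simp; intro _; omega
    rw [fsp_cons, fsp_nil]
    by_cases h : 0 < i
    · have e0 : (0 < i && i % 3 == 0) = true := by simp; exact ⟨h, by omega⟩
      rw [if_pos e0, if_pos ⟨h, by simp⟩]; simp [grp]
    · have e0 : ¬ (0 < i && i % 3 == 0) = true := by simp; intro hc; omega
      rw [if_neg e0, if_neg (by intro hc; exact h hc.1)]; simp [grp]
  | case3 c1 c2 =>
    intro i h0 h3
    have e1 : ¬ (0 < i + 1 && (i + 1) % 3 == 0) = true := by simp; intro _; omega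
    rw [fsp_cons, fsp_cons, fsp_nil, if_neg e1]
    by_cases h : 0 < i
    · have e0 : (0 < i && i % 3 == 0) = true := by simp; exact ⟨h, by omega⟩
      rw [if_pos e0, if_pos ⟨h, by simp⟩]; simp [grp]
    · have e0 : ¬ (0 < i && i % 3 == 0) = true := by simp; intro hc; omega
      rw [if_neg e0, if_neg (by intro hc; exact h hc.1)]; simp [grp]
  | case4 c1 c2 c3 =>
    intro i h0 h3
    have e1 : ¬ (0 < i + 1 && (i + 1) % 3 == 0) = true := by simp; intro _; omega
    have e2 : ¬ (0 < i + 1 + 1 && (i + 1 + 1) % 3 == 0) = true := by simp; intro _; omega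
    rw [fsp_cons, fsp_cons, fsp_cons, fsp_nil, if_neg e1, if_neg e2]
    by_cases h : 0 < i
    · have e0 : (0 < i && i % 3 == 0) = true := by simp; exact ⟨h, by omega⟩
      rw [if_pos e0, if_pos ⟨h, by simp⟩]; simp [grp]
    · have e0 : ¬ (0 < i && i % 3 == 0) = true := by simp; intro hc; omega
      rw [if_neg e0, if_neg (by intro hc; exact h hc.1)]; simp [grp]
  | case5 c1 c2 c3 c4 t ih =>
    intro i h0 h3
    have e1 : ¬ (0 < i + 1 && (i + 1) % 3 == 0) = true := by simp; intro _; omega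
    have e2 : ¬ (0 < i + 1 + 1 && (i + 1 + 1) % 3 == 0) = true := by simp; intro _; omega
    have ht := ih (i + 1 + 1 + 1) (by omega) (by omega)
    rw [if_pos ⟨by omega, by simp⟩] at ht
    rw [fsp_cons, fsp_cons, fsp_cons, ht, if_neg e1, if_neg e2]
    by_cases h : 0 < i
    · have e0 : (0 < i && i % 3 == 0) = true := by simp; exact ⟨h, by omega⟩
      rw [if_pos e0, if_pos ⟨h, by simp⟩]; simp [grp]
    · have e0 : ¬ (0 < i && i % 3 == 0) = true := by simp; intro hc; omega
      rw [if_neg e0, if_neg (by intro hc; exact h hc.1)]; simp [grp]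

theorem main_eq (s : List Char) :
    PySem.Chars.join [' ']
      ((PySem.List.pyRange 0 (s.length : Int) 3).map
        (fun i => PySem.List.slice s (some i) (some (i + 3))))
      = (PySem.List.enumerate s).foldl
          (fun acc p => (if 0 < p.1 && p.1 % 3 == 0 then acc ++ [' '] else acc) ++ [p.2]) [] := by
  rw [foldl_enum, List.nil_append, fsp_eq s 0 le_rfl ⟨0, rfl⟩]
  simp only [lt_self_iff_false, false_and, if_false, List.nil_append]
  rw [PySem.List.pyRange_of_pos 0 (s.length : Int) (by norm_num)]
  have hm : (if (0:Int) < (s.length : Int) then (((s.length : Int) - 0 + 3 - 1) / 3).toNat else 0)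
      = (s.length + 2) / 3 := by
    split_ifs with h
    · have h1 : ((s.length : Int) - 0 + 3 - 1) = ((s.length + 2 : Nat) : Int) := by push_cast; ring
      rw [h1, show ((3:Int)) = ((3:Nat):Int) from rfl, ← Int.natCast_div, Int.toNat_natCast]
    · have : s.length = 0 := by omega
      omega
  rw [hm, List.map_map]
  have hpt : ∀ k ∈ List.range ((s.length + 2) / 3),
      ((fun i => PySem.List.slice s (some i) (some (i + 3))) ∘ fun (k : Nat) => (0 : Int) + 3 * (k : Int)) k
        = (s.drop (3 * k)).take 3 := by
    intro k _
    have h1 : ((0 : Int) + 3 * (k : Int)) = ((3 * k : Nat) : Int) := by push_cast; ring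
    simp only [Function.comp, h1]
    exact_mod_cast PySem.List.slice_natCast_add s (3 * k) 3
  rw [List.map_congr_left hpt]
  exact join_chunks _ s (by omega) (by omega)

-- ===== VERDICT (by name: the statement is the Claim_ definition above) =====
theorem litering_by_three_spec : Claim_equal_litering_by_three := by
  intro a _
  unfold Spec_litering_by_three litering_by_three litering_by_three_alt
  simp only []
  rw [main_eq]
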